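-- pv_equiv track=rewrite | github.com/AdamZhouSE/pythonHomework | Code/CodeRecords/2385/60900/302080.py | check
-- ===== SOURCE A (Python) =====
-- def check(a):
--     b = a;
--     while(a!=0):
--         if a%2==1:
--             if a==1:
--                 return 1
--             a=int(a/2)
--             if a%2==1:
--                 return 0
--         else:
--             a=int(a/2)
--
--     return 1
-- ===== SOURCE B (Python) =====
-- def check(a):
--     n = abs(a)
--     return 1 if n & (n >> 1) == 0 else 0
-- ===== Notes on version B (the rewrite author's own statement) =====
-- stated objective: simpler
-- what changed: Replaces the arithmetic bit-peeling while-loop with a single bit-trick test n & (n >> 1) == 0 on the magnitude, which vanishes iff no two adjacent binary digits of |a| are both set.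
import Mathlib
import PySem

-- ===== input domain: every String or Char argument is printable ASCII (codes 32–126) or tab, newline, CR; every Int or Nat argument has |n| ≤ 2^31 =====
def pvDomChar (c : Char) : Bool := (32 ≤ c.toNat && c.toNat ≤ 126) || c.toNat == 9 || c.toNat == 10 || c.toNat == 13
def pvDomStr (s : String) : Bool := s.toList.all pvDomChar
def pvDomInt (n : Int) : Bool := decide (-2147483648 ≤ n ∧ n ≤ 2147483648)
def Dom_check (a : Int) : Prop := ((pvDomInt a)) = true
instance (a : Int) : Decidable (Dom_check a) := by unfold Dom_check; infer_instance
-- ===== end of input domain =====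

-- B replaces A's bit-peeling while-loop by a single bitwise test of the magnitude against its half-shift (simpler).


-- ===== PORT A =====
-- termination helper for the while-loop: int(a/2) shrinks |a|
theorem pvTdivLt (a : Int) (h : ¬ a = 0) : (a.tdiv 2).natAbs < a.natAbs := by
  rw [Int.natAbs_tdiv]; show a.natAbs / 2 < a.natAbs; omega

-- the while-loop of A; int(a/2) is truncation toward zero (= Int.tdiv; exact since floats
-- represent |a| ≤ 2^31 and a/2 exactly), a % 2 is Python's floor-mod PySem.Int.mod
def checkLoop (a : Int) : Int :=
  if _h : ¬ a = 0 then
    if PySem.Int.mod a 2 = 1 then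
      if a = 1 then 1
      else
        let a' := a.tdiv 2
        if PySem.Int.mod a' 2 = 1 then 0
        else checkLoop a'
    else checkLoop (a.tdiv 2)
  else 1
termination_by a.natAbs
decreasing_by all_goals exact pvTdivLt a _h

def check (a : Int) : Int :=
  let _b := a   -- A's unused 'b = a'
  checkLoop a

-- ===== PORT B =====
def check_alt (a : Int) : Int :=
  let n := a.natAbs
  if n &&& (n >>> 1) = 0 then 1 else 0

-- ===== PRECONDITION & SPEC =====
def Spec_check (a : Int) (out : Int) : Prop := out = check_alt a
instance (a : Int) (out : Int) : Decidable (Spec_check a out) := by unfold Spec_check; infer_instance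

-- ===== CLAIM (what is proved, stated in full; the proofs are below) =====
def Claim_equal_check : Prop := ∀ (a : Int), Dom_check a → Spec_check a (check a)

-- ===== LEMMAS AND PROOFS =====

-- n &&& (n >>> 1) = 0 iff no two adjacent set bits
theorem pvAndShift_zero_iff (n : Nat) :
    n &&& (n >>> 1) = 0 ↔ ∀ i, ¬ (n.testBit i = true ∧ n.testBit (i+1) = true) := by
  constructor
  · intro h i hi
    have := congrArg (fun x => Nat.testBit x i) h
    simp [Nat.testBit_and, Nat.testBit_shiftRight, Nat.zero_testBit, hi.1,
      Nat.add_comm 1 i, hi.2] at this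
  · intro h
    apply Nat.eq_of_testBit_eq
    intro i
    simp [Nat.testBit_and, Nat.testBit_shiftRight, Nat.zero_testBit]
    intro h1
    have := h i
    rw [Nat.add_comm]
    simp [h1] at this
    simp [this]

theorem pvMod2_testBit (n : Nat) : n.testBit 0 = decide (n % 2 = 1) := Nat.testBit_zero n

-- even step: dropping a 0 low bit preserves the property
theorem pvStep_even (n : Nat) (h : n % 2 = 0) :
    (n &&& (n >>> 1) = 0 ↔ (n/2) &&& ((n/2) >>> 1) = 0) := by
  rw [pvAndShift_zero_iff, pvAndShift_zero_iff]
  constructor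
  · intro H i hi
    exact H (i+1) ⟨by rw [Nat.testBit_add_one]; exact hi.1,
                   by rw [Nat.testBit_add_one]; exact hi.2⟩
  · intro H i hi
    match i with
    | 0 => have := hi.1; rw [pvMod2_testBit] at this; simp [h] at this
    | j+1 => exact H j ⟨by rw [← Nat.testBit_add_one]; exact hi.1,
                        by rw [← Nat.testBit_add_one]; exact hi.2⟩
-- odd step with even next bit: dropping a 1 low bit followed by 0 preserves the property
theorem pvStep_odd_even (n : Nat) (h2 : (n/2) % 2 = 0) :
    (n &&& (n >>> 1) = 0 ↔ (n/2) &&& ((n/2) >>> 1) = 0) := by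
  rw [pvAndShift_zero_iff, pvAndShift_zero_iff]
  constructor
  · intro H i hi
    exact H (i+1) ⟨by rw [Nat.testBit_add_one]; exact hi.1,
                   by rw [Nat.testBit_add_one]; exact hi.2⟩
  · intro H i hi
    match i with
    | 0 =>
      have := hi.2
      rw [Nat.testBit_add_one, pvMod2_testBit] at this
      simp [h2] at this
    | j+1 => exact H j ⟨by rw [← Nat.testBit_add_one]; exact hi.1,
                        by rw [← Nat.testBit_add_one]; exact hi.2⟩

-- two adjacent 1 bits at the bottom: the test fires
theorem pvStep_odd_odd (n : Nat) (h : n % 2 = 1) (h2 : (n/2) % 2 = 1) :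
    n &&& (n >>> 1) ≠ 0 := by
  rw [Ne, pvAndShift_zero_iff]
  intro H
  exact H 0 ⟨by rw [pvMod2_testBit]; simp [h],
             by rw [Nat.testBit_add_one, pvMod2_testBit]; simp [h2]⟩

theorem pvMod_eq (a : Int) : PySem.Int.mod a 2 = 1 ↔ a.natAbs % 2 = 1 := by
  rw [PySem.Int.mod_eq_emod_of_pos (by norm_num : (0:Int) < 2)]
  omega

theorem pvLoop_eq (n : Nat) : ∀ a : Int, a.natAbs = n →
    checkLoop a = (if n &&& (n >>> 1) = 0 then 1 else 0) := by
  induction n using Nat.strong_induction_on with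
  | _ n ih =>
    intro a ha
    rw [checkLoop]
    by_cases h0 : a = 0
    · subst h0
      simp at ha
      subst ha
      simp
    · have hn0 : n ≠ 0 := by subst ha; simpa using h0
      have ha' : (a.tdiv 2).natAbs = n / 2 := by
        rw [Int.natAbs_tdiv]; show a.natAbs / 2 = n / 2; rw [ha]
      simp only [h0, not_false_eq_true, dite_true]
      by_cases hodd : PySem.Int.mod a 2 = 1
      · have hno : n % 2 = 1 := by rw [← ha, ← pvMod_eq]; exact hodd
        simp only [hodd, if_true]
        by_cases h1 : a = 1
        · subst h1
          simp at ha
          subst ha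
          decide
        · simp only [h1, if_false]
          by_cases hodd2 : PySem.Int.mod (a.tdiv 2) 2 = 1
          · have : (n/2) % 2 = 1 := by rw [← ha', ← pvMod_eq]; exact hodd2
            have := pvStep_odd_odd n hno this
            rw [if_pos hodd2, if_neg this]
          · have heven2 : (n/2) % 2 = 0 := by
              have := (pvMod_eq (a.tdiv 2)).not.mp hodd2
              rw [ha'] at this; omega
            have hrec := ih (n/2) (by omega) (a.tdiv 2) ha'
            simp only [hodd2, if_false]
            rw [hrec]
            rcases (pvStep_odd_even n heven2) with ⟨f, g⟩
            by_cases hz : n &&& (n >>> 1) = 0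
            · simp [hz, f hz]
            · have : ¬ ((n/2) &&& ((n/2) >>> 1) = 0) := fun hc => hz (g hc)
              simp [hz, this]
      · have hne : n % 2 = 0 := by
          have := (pvMod_eq a).not.mp hodd
          rw [ha] at this; omega
        have hrec := ih (n/2) (by omega) (a.tdiv 2) ha'
        simp only [hodd, if_false]
        rw [hrec]
        rcases (pvStep_even n hne) with ⟨f, g⟩
        by_cases hz : n &&& (n >>> 1) = 0
        · simp [hz, f hz]
        · have : ¬ ((n/2) &&& ((n/2) >>> 1) = 0) := fun hc => hz (g hc)
          simp [hz, this]

-- ===== VERDICT (by name: the statement is the Claim_ definition above) =====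
theorem check_spec : Claim_equal_check := by
  intro a _
  show check a = check_alt a
  rw [check, check_alt]
  exact pvLoop_eq a.natAbs a rfl
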